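-- pv_equiv track=rewrite | github.com/elibenjii/pythontrading | step1_normalizing_dataset.py | find_matching_tokens
-- ===== SOURCE A (Python) =====
-- def find_matching_tokens(airdrop_entry, tokens_data):
--     """Find matching tokens based on name first, then symbol if no name match"""
--     airdrop_name = airdrop_entry.get('airdropAssetFullName', '')
--     airdrop_asset = airdrop_entry.get('airdropAsset', '').lower()
--
--     name_matches = []
--     symbol_matches = []
--
--     for token in tokens_data:
--         token_name = token.get('name', '')
--         token_symbol = token.get('symbol', '').lower()
--         token_id = token.get('id', '')
--
--         # Check if the token name matches the airdrop name
--         if token_name == airdrop_name: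
--             name_matches.append({
--                 'id': token_id,
--                 'name': token_name,
--                 'symbol': token_symbol,
--                 'match_type': 'name'
--             })
--
--         # Check if the token symbol matches the airdrop asset (lowercase)
--         elif token_symbol == airdrop_asset:
--             symbol_matches.append({
--                 'id': token_id,
--                 'name': token_name,
--                 'symbol': token_symbol,
--                 'match_type': 'symbol'
--             })
--
--     # Return name matches if found, otherwise symbol matches
--     return name_matches if name_matches else symbol_matches
-- ===== SOURCE B (Python) =====
-- def find_matching_tokens(airdrop_entry, tokens_data):
--     """Two-pass version: collect name matches first and return early;
--     only if none exist, scan again for symbol matches."""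
--     airdrop_name = airdrop_entry.get('airdropAssetFullName', '')
--     name_matches = [
--         {'id': token.get('id', ''),
--          'name': token.get('name', ''),
--          'symbol': token.get('symbol', '').lower(),
--          'match_type': 'name'}
--         for token in tokens_data
--         if token.get('name', '') == airdrop_name
--     ]
--     if name_matches:
--         return name_matches
--     airdrop_asset = airdrop_entry.get('airdropAsset', '').lower()
--     return [
--         {'id': token.get('id', ''),
--          'name': token.get('name', ''),
--          'symbol': token.get('symbol', '').lower(),
--          'match_type': 'symbol'}
--         for token in tokens_data
--         if token.get('symbol', '').lower() == airdrop_asset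
--     ]
-- ===== Notes on version B (the rewrite author's own statement) =====
-- stated objective: simpler
-- what changed: Replaced the single loop that maintains two accumulator lists with an elif by two independent comprehension passes: a name pass with an early return, and a symbol pass run only when no name matched (sound because the elif exclusion is vacuous exactly then).
import Mathlib
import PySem

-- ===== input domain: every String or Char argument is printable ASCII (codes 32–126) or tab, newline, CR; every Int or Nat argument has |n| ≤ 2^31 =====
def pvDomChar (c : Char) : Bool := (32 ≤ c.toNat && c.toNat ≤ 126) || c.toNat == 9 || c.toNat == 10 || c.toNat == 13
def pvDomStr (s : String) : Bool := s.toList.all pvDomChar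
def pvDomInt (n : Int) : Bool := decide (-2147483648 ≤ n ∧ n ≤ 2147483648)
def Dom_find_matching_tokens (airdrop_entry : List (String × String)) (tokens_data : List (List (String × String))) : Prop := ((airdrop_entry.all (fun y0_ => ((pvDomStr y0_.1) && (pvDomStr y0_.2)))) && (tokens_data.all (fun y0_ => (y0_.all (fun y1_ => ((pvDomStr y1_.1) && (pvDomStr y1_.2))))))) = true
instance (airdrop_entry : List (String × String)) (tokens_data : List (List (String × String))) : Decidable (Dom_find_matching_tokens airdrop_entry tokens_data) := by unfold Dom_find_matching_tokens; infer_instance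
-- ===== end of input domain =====

-- B replaces A's single loop with two accumulators and an elif by two independent
-- comprehension passes with an early return after the name pass (objective: simpler).

-- ===== PORT A =====
-- Python d.get(k, dflt) on an association list: first matching key, else the default
def pvGet (d : List (String × String)) (k dflt : String) : String :=
  match d.find? (fun p => p.1 == k) with
  | some p => p.2
  | none => dflt

-- the dict literal A appends in either branch
def pvMkMatchA (ti tn ts mt : String) : List (String × String) :=
  [("id", ti), ("name", tn), ("symbol", ts), ("match_type", mt)]

-- A's loop body, abstracted over the two airdrop values
def pvStepA (an aa : String) (s : List (List (String × String)) × List (List (String × String))) (token : List (String × String)) : List (List (String × String)) × List (List (String × String)) :=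
  let token_name := pvGet token "name" ""
  let token_symbol := PySem.Str.lower (pvGet token "symbol" "")
  let token_id := pvGet token "id" ""
  if token_name = an then
    (s.1 ++ [pvMkMatchA token_id token_name token_symbol "name"], s.2)
  else if token_symbol = aa then
    (s.1, s.2 ++ [pvMkMatchA token_id token_name token_symbol "symbol"])
  else s

def find_matching_tokens (airdrop_entry : List (String × String)) (tokens_data : List (List (String × String))) : List (List (String × String)) :=
  let airdrop_name := pvGet airdrop_entry "airdropAssetFullName" ""
  let airdrop_asset := PySem.Str.lower (pvGet airdrop_entry "airdropAsset" "")
  let st := tokens_data.foldl (pvStepA airdrop_name airdrop_asset) ([], [])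
  if st.1 ≠ [] then st.1 else st.2

-- ===== PORT B =====
-- the dict literal B's comprehensions build
def pvMkMatchB (token : List (String × String)) (mt : String) : List (String × String) :=
  [("id", pvGet token "id" ""),
   ("name", pvGet token "name" ""),
   ("symbol", PySem.Str.lower (pvGet token "symbol" "")),
   ("match_type", mt)]

def find_matching_tokens_alt (airdrop_entry : List (String × String)) (tokens_data : List (List (String × String))) : List (List (String × String)) :=
  let airdrop_name := pvGet airdrop_entry "airdropAssetFullName" ""
  let name_matches := tokens_data.filterMap (fun token =>
    if pvGet token "name" "" = airdrop_name then some (pvMkMatchB token "name") else none)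
  if name_matches ≠ [] then name_matches
  else
    let airdrop_asset := PySem.Str.lower (pvGet airdrop_entry "airdropAsset" "")
    tokens_data.filterMap (fun token =>
      if PySem.Str.lower (pvGet token "symbol" "") = airdrop_asset then some (pvMkMatchB token "symbol") else none)

-- ===== PRECONDITION & SPEC =====
def Spec_find_matching_tokens (airdrop_entry : List (String × String)) (tokens_data : List (List (String × String))) (out : List (List (String × String))) : Prop := out = find_matching_tokens_alt airdrop_entry tokens_data
instance (airdrop_entry : List (String × String)) (tokens_data : List (List (String × String))) (out : List (List (String × String))) : Decidable (Spec_find_matching_tokens airdrop_entry tokens_data out) := by unfold Spec_find_matching_tokens; infer_instance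

-- ===== CLAIM (what is proved, stated in full; the proofs are below) =====
def Claim_equal_find_matching_tokens : Prop := ∀ (airdrop_entry : List (String × String)) (tokens_data : List (List (String × String))), Dom_find_matching_tokens airdrop_entry tokens_data → Spec_find_matching_tokens airdrop_entry tokens_data (find_matching_tokens airdrop_entry tokens_data)

-- ===== LEMMAS AND PROOFS =====

-- B's two passes, abstracted
def pvNameP (an : String) (ts : List (List (String × String))) : List (List (String × String)) :=
  ts.filterMap (fun token => if pvGet token "name" "" = an then some (pvMkMatchB token "name") else none)

def pvSymP (aa : String) (ts : List (List (String × String))) : List (List (String × String)) :=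
  ts.filterMap (fun token => if PySem.Str.lower (pvGet token "symbol" "") = aa then some (pvMkMatchB token "symbol") else none)

-- A's symbol accumulator: symbol matches among tokens that did NOT match the name
def pvSymRest (an aa : String) : List (List (String × String)) → List (List (String × String))
  | [] => []
  | t :: ts =>
    if pvGet t "name" "" = an then pvSymRest an aa ts
    else if PySem.Str.lower (pvGet t "symbol" "") = aa then pvMkMatchB t "symbol" :: pvSymRest an aa ts
    else pvSymRest an aa ts

theorem pvFoldA_eq (an aa : String) (ts : List (List (String × String))) :
    ∀ nm sm, ts.foldl (pvStepA an aa) (nm, sm) = (nm ++ pvNameP an ts, sm ++ pvSymRest an aa ts) := by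
  induction ts with
  | nil => intro nm sm; simp [pvNameP, pvSymRest]
  | cons t ts ih =>
    intro nm sm
    simp only [List.foldl_cons, pvStepA, pvNameP, pvSymRest, List.filterMap_cons]
    split_ifs with h1 h2 <;>
      simp [ih, pvNameP, pvMkMatchA, pvMkMatchB, List.append_assoc]

theorem pvSymRest_eq (an aa : String) (ts : List (List (String × String)))
    (h : pvNameP an ts = []) : pvSymRest an aa ts = pvSymP aa ts := by
  induction ts with
  | nil => simp [pvSymRest, pvSymP]
  | cons t ts ih =>
    simp only [pvNameP, List.filterMap_cons] at h
    by_cases h1 : pvGet t "name" "" = an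
    · simp [h1] at h
    · rw [if_neg h1] at h
      have ih' := ih h
      simp only [pvSymRest, pvSymP, List.filterMap_cons, if_neg h1] at ih' ⊢
      split_ifs with h2 <;> simp [ih']

-- ===== VERDICT (by name: the statement is the Claim_ definition above) =====
theorem find_matching_tokens_spec : Claim_equal_find_matching_tokens := by
  intro ae ts _
  unfold Spec_find_matching_tokens
  have hfold := pvFoldA_eq (pvGet ae "airdropAssetFullName" "") (PySem.Str.lower (pvGet ae "airdropAsset" "")) ts [] []
  simp only [List.nil_append] at hfold
  have hA : find_matching_tokens ae ts =
      (if pvNameP (pvGet ae "airdropAssetFullName" "") ts ≠ [] then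
        pvNameP (pvGet ae "airdropAssetFullName" "") ts
      else pvSymRest (pvGet ae "airdropAssetFullName" "") (PySem.Str.lower (pvGet ae "airdropAsset" "")) ts) := by
    simp only [find_matching_tokens]
    rw [hfold]
  have hB : find_matching_tokens_alt ae ts =
      (if pvNameP (pvGet ae "airdropAssetFullName" "") ts ≠ [] then
        pvNameP (pvGet ae "airdropAssetFullName" "") ts
      else pvSymP (PySem.Str.lower (pvGet ae "airdropAsset" "")) ts) := rfl
  rw [hA, hB]
  by_cases h : pvNameP (pvGet ae "airdropAssetFullName" "") ts = []
  · simp only [h]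
    simp [pvSymRest_eq _ _ ts h]
  · simp only [if_pos h]
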